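-- pv_equiv track=rewrite | github.com/gahjelle/advent_of_code | python/2015/15_science_for_hungry_people/aoc201515.py | score_cookie
-- ===== SOURCE A (Python) =====
-- def score_cookie(ingredients, spoons):
--     """Score the composition of one cookie.
--
--     ## Example:
--
--     >>> ingredients = [
--     ...     {"capacity": -1, "durability": -2, "flavor": 6, "texture": 3},
--     ...     {"capacity": 2, "durability": 3, "flavor": -2, "texture": -1},
--     ... ]
--     >>> score_cookie(ingredients, (30, 70))
--     [110, 150, 40, 20]
--     """
--     return [
--         max(
--             sum(
--                 num_spoons * per_spoon[property]
--                 for num_spoons, per_spoon in zip(spoons, ingredients)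
--             ),
--             0,
--         )
--         for property in ("capacity", "durability", "flavor", "texture")
--     ]
-- ===== SOURCE B (Python) =====
-- def _totals(pairs):
--     """Recursively total the scaled property vectors of (spoons, ingredient) pairs, back to front."""
--     if not pairs:
--         return (0, 0, 0, 0)
--     num_spoons, per_spoon = pairs[0]
--     cap, dur, fla, tex = _totals(pairs[1:])
--     return (cap + num_spoons * per_spoon["capacity"],
--             dur + num_spoons * per_spoon["durability"],
--             fla + num_spoons * per_spoon["flavor"],
--             tex + num_spoons * per_spoon["texture"])
--
--
-- def score_cookie(ingredients, spoons):
--     """Score the composition of one cookie.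
--
--     One recursive traversal of the zipped list builds all four property
--     totals back to front; the clamp is applied once at the end.
--     """
--     return [max(total, 0) for total in _totals(list(zip(spoons, ingredients)))]
-- ===== Notes on version B (the rewrite author's own statement) =====
-- stated objective: alternative
-- what changed: B replaces A's four per-property generator scans of the zipped list by one recursive traversal that builds a 4-tuple of totals back to front, clamping once at the end.
import Mathlib
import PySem

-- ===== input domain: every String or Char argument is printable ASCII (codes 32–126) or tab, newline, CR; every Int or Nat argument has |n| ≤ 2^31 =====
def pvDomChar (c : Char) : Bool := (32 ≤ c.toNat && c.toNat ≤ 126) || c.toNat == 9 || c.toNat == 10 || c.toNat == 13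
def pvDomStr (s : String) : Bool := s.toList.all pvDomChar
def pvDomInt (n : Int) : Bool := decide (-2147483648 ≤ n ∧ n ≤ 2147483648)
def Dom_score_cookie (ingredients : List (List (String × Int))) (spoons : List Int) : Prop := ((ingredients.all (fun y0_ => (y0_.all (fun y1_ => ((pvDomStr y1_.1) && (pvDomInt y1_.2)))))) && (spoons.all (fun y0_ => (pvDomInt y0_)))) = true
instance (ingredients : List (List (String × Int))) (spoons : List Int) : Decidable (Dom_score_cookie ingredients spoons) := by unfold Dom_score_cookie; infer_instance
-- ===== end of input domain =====

-- B changes the decomposition: one recursive back-to-front traversal building all four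
-- totals at once instead of A's four per-property scans; equal results, same cost class.

-- dict lookup per_spoon[property]: first match in the association list
def pvLookup (d : List (String × Int)) (k : String) : Option Int :=
  (d.find? (fun p => p.1 == k)).map (·.2)

-- ===== PORT A =====
def score_cookie (ingredients : List (List (String × Int))) (spoons : List Int) : List Int :=
  ["capacity", "durability", "flavor", "texture"].map (fun property =>
    max ((spoons.zip ingredients).foldl
          (fun acc np => acc + np.1 * (pvLookup np.2 property).getD 0) 0) 0)

-- ===== PORT B =====
-- _totals: recursion on the zipped list, totals built back to front
def scoreTotals (pairs : List (Int × List (String × Int))) : Int × Int × Int × Int :=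
  match pairs with
  | [] => (0, 0, 0, 0)
  | np :: rest =>
    let t := scoreTotals rest
    (t.1 + np.1 * (pvLookup np.2 "capacity").getD 0,
     t.2.1 + np.1 * (pvLookup np.2 "durability").getD 0,
     t.2.2.1 + np.1 * (pvLookup np.2 "flavor").getD 0,
     t.2.2.2 + np.1 * (pvLookup np.2 "texture").getD 0)

def score_cookie_alt (ingredients : List (List (String × Int))) (spoons : List Int) : List Int :=
  let t := scoreTotals (spoons.zip ingredients)
  [max t.1 0, max t.2.1 0, max t.2.2.1 0, max t.2.2.2 0]

-- ===== PRECONDITION & SPEC =====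
-- Pre_ excludes exactly the inputs where a zipped ingredient lacks one of the four
-- property keys: there Python A raises KeyError (and B raises too).
def Pre_score_cookie (ingredients : List (List (String × Int))) (spoons : List Int) : Prop :=
  ∀ np ∈ spoons.zip ingredients,
    ∀ k ∈ (["capacity", "durability", "flavor", "texture"] : List String),
      ∃ pr ∈ np.2, pr.1 = k
instance (ingredients : List (List (String × Int))) (spoons : List Int) : Decidable (Pre_score_cookie ingredients spoons) := by unfold Pre_score_cookie; infer_instance

def pvWitness_score_cookie : (List (List (String × Int))) × List Int :=
  ([[("capacity", -1), ("durability", -2), ("flavor", 6), ("texture", 3)],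
    [("capacity", 2), ("durability", 3), ("flavor", -2), ("texture", -1)]], [30, 70])

def Spec_score_cookie (ingredients : List (List (String × Int))) (spoons : List Int) (out : List Int) : Prop := out = score_cookie_alt ingredients spoons
instance (ingredients : List (List (String × Int))) (spoons : List Int) (out : List Int) : Decidable (Spec_score_cookie ingredients spoons out) := by unfold Spec_score_cookie; infer_instance

-- ===== CLAIM =====
def Claim_equal_score_cookie : Prop := ∀ (ingredients : List (List (String × Int))) (spoons : List Int), Dom_score_cookie ingredients spoons → Pre_score_cookie ingredients spoons → Spec_score_cookie ingredients spoons (score_cookie ingredients spoons)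

-- ===== LEMMAS AND PROOFS =====

-- A's four left folds compute, from any start, exactly the components of B's recursion
theorem foldl_eq_totals (l : List (Int × List (String × Int))) :
    ∀ a : Int,
    (l.foldl (fun acc np => acc + np.1 * (pvLookup np.2 "capacity").getD 0) a
        = a + (scoreTotals l).1)
  ∧ (l.foldl (fun acc np => acc + np.1 * (pvLookup np.2 "durability").getD 0) a
        = a + (scoreTotals l).2.1)
  ∧ (l.foldl (fun acc np => acc + np.1 * (pvLookup np.2 "flavor").getD 0) a
        = a + (scoreTotals l).2.2.1)
  ∧ (l.foldl (fun acc np => acc + np.1 * (pvLookup np.2 "texture").getD 0) a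
        = a + (scoreTotals l).2.2.2) := by
  induction l with
  | nil => intro a; simp [scoreTotals]
  | cons np rest ih =>
    intro a
    refine ⟨?_, ?_, ?_, ?_⟩ <;>
      simp only [List.foldl_cons, scoreTotals] <;>
      [rw [(ih _).1]; rw [(ih _).2.1]; rw [(ih _).2.2.1]; rw [(ih _).2.2.2]] <;>
      ring

-- ===== VERDICT =====
theorem score_cookie_spec : Claim_equal_score_cookie := by
  intro ingredients spoons _ _
  unfold Spec_score_cookie score_cookie score_cookie_alt
  simp only [List.map]
  rw [(foldl_eq_totals (spoons.zip ingredients) 0).1,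
      (foldl_eq_totals (spoons.zip ingredients) 0).2.1,
      (foldl_eq_totals (spoons.zip ingredients) 0).2.2.1,
      (foldl_eq_totals (spoons.zip ingredients) 0).2.2.2]
  simp
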